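-- pv_equiv track=rewrite | github.com/saravargas88/SFT-RL | student/evaluate_assignment_baseline.py | summarize_reward_categories
-- ===== SOURCE A (Python) =====
-- from typing import Any
--
-- def summarize_reward_categories(results: list[dict[str, Any]]) -> dict[str, int]:
--     return {
--         "correct_format_and_answer": sum(
--             1 for result in results if result["format_reward"] == 1 and result["answer_reward"] == 1
--         ),
--         "correct_format_wrong_answer": sum(
--             1 for result in results if result["format_reward"] == 1 and result["answer_reward"] == 0
--         ),
--         "wrong_format_wrong_answer": sum(
--             1 for result in results if result["format_reward"] == 0 and result["answer_reward"] == 0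
--         ),
--         "wrong_format_right_answer": sum(
--             1 for result in results if result["format_reward"] == 0 and result["answer_reward"] == 1
--         ),
--     }
-- ===== SOURCE B (Python) =====
-- def summarize_reward_categories(results):
--     cfa = cfw = wfw = wfr = 0
--     for result in results:
--         f = result["format_reward"]
--         if f == 1:
--             if result["answer_reward"] == 1:
--                 cfa += 1
--             elif result["answer_reward"] == 0:
--                 cfw += 1
--         elif f == 0:
--             if result["answer_reward"] == 0:
--                 wfw += 1
--             elif result["answer_reward"] == 1:
--                 wfr += 1
--     return {
--         "correct_format_and_answer": cfa,
--         "correct_format_wrong_answer": cfw,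
--         "wrong_format_wrong_answer": wfw,
--         "wrong_format_right_answer": wfr,
--     }
-- ===== Notes on version B (the rewrite author's own statement) =====
-- stated objective: alternative
-- what changed: Replaces four separate comprehension scans (one per category) with a single pass that classifies each result once into four integer counters (trades four simple scans for one loop with a branch chain).
import Mathlib
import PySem

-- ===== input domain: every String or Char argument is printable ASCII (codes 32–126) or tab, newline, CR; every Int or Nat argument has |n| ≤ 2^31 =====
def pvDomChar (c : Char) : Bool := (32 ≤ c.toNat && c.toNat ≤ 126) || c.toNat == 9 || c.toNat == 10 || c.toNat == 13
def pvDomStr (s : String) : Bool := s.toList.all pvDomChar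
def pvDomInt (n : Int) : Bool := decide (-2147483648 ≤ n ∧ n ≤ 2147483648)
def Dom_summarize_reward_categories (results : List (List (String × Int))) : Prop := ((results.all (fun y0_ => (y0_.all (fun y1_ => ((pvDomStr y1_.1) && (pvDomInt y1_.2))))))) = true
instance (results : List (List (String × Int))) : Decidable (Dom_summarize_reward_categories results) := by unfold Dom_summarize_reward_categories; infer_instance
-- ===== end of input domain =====

-- ===== PORT A =====
-- B replaces A's four separate comprehension scans with a single classifying pass; objective: alternative (single-pass decomposition).

-- result["k"]: first-match lookup in the association list (Python dict access; none = KeyError)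
def pvKey (r : List (String × Int)) (k : String) : Option Int := PySem.Dict.get? ⟨r⟩ k

-- sum(1 for result in results if result["format_reward"] == f and result["answer_reward"] == a)
def pvSumA (results : List (List (String × Int))) (f a : Int) : Int :=
  results.foldl (fun acc r =>
    if pvKey r "format_reward" == some f && pvKey r "answer_reward" == some a then acc + 1 else acc) 0

def summarize_reward_categories (results : List (List (String × Int))) : List (String × Int) :=
  [("correct_format_and_answer", pvSumA results 1 1),
   ("correct_format_wrong_answer", pvSumA results 1 0),
   ("wrong_format_wrong_answer", pvSumA results 0 0),
   ("wrong_format_right_answer", pvSumA results 0 1)]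

-- ===== PORT B =====
-- one pass; state = (cfa, cfw, wfw, wfr)
def pvStep (s : Int × Int × Int × Int) (r : List (String × Int)) : Int × Int × Int × Int :=
  let f := pvKey r "format_reward"
  if f == some 1 then
    if pvKey r "answer_reward" == some 1 then (s.1 + 1, s.2.1, s.2.2.1, s.2.2.2)
    else if pvKey r "answer_reward" == some 0 then (s.1, s.2.1 + 1, s.2.2.1, s.2.2.2)
    else s
  else if f == some 0 then
    if pvKey r "answer_reward" == some 0 then (s.1, s.2.1, s.2.2.1 + 1, s.2.2.2)
    else if pvKey r "answer_reward" == some 1 then (s.1, s.2.1, s.2.2.1, s.2.2.2 + 1)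
    else s
  else s

def summarize_reward_categories_alt (results : List (List (String × Int))) : List (String × Int) :=
  let c := results.foldl pvStep (0, 0, 0, 0)
  [("correct_format_and_answer", c.1),
   ("correct_format_wrong_answer", c.2.1),
   ("wrong_format_wrong_answer", c.2.2.1),
   ("wrong_format_right_answer", c.2.2.2)]

-- ===== PRECONDITION & SPEC =====
-- Pre_: exactly where the Python A returns (no KeyError): every result has "format_reward",
-- and has "answer_reward" whenever its format_reward is 0 or 1 (A's short-circuit reads it only then).
def Pre_summarize_reward_categories (results : List (List (String × Int))) : Prop :=
  ∀ r ∈ results, (pvKey r "format_reward").isSome = true ∧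
    ((pvKey r "format_reward" = some 0 ∨ pvKey r "format_reward" = some 1) →
      (pvKey r "answer_reward").isSome = true)
instance (results : List (List (String × Int))) : Decidable (Pre_summarize_reward_categories results) := by unfold Pre_summarize_reward_categories; infer_instance

def pvWitness_summarize_reward_categories : (List (List (String × Int))) :=
  [[("format_reward", 1), ("answer_reward", 0)], [("format_reward", 0), ("answer_reward", 1)], [("format_reward", 2)]]

def Spec_summarize_reward_categories (results : List (List (String × Int))) (out : List (String × Int)) : Prop := out = summarize_reward_categories_alt results
instance (results : List (List (String × Int))) (out : List (String × Int)) : Decidable (Spec_summarize_reward_categories results out) := by unfold Spec_summarize_reward_categories; infer_instance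

-- ===== CLAIM (what is proved, stated in full; the proofs are below) =====
def Claim_equal_summarize_reward_categories : Prop := ∀ (results : List (List (String × Int))), Dom_summarize_reward_categories results → Pre_summarize_reward_categories results → Spec_summarize_reward_categories results (summarize_reward_categories results)

-- ===== LEMMAS AND PROOFS =====

-- one count, shifted start
lemma pvSumA_shift (results : List (List (String × Int))) (f a : Int) : ∀ n : Int,
    results.foldl (fun acc r =>
      if pvKey r "format_reward" == some f && pvKey r "answer_reward" == some a then acc + 1 else acc) n
    = n + pvSumA results f a := by
  induction results with
  | nil => intro n; simp [pvSumA]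
  | cons r rs ih =>
    intro n
    simp only [pvSumA, List.foldl_cons]
    by_cases h : (pvKey r "format_reward" == some f && pvKey r "answer_reward" == some a) = true
    · simp only [h, if_pos]
      rw [ih (n + 1), ih (0 + 1)]; ring
    · simp only [Bool.not_eq_true] at h
      simp only [h, Bool.false_eq_true, if_false]
      rw [ih n, ih 0]; ring

lemma pvSumA_cons (r : List (String × Int)) (rs : List (List (String × Int))) (f a : Int) :
    pvSumA (r :: rs) f a
    = (if pvKey r "format_reward" == some f && pvKey r "answer_reward" == some a then 1 else 0) + pvSumA rs f a := by
  simp only [pvSumA, List.foldl_cons]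
  by_cases h : (pvKey r "format_reward" == some f && pvKey r "answer_reward" == some a) = true
  · simp only [h, if_pos]; exact pvSumA_shift rs f a 1
  · simp only [Bool.not_eq_true] at h
    simp only [h, Bool.false_eq_true, if_false]
    simpa using pvSumA_shift rs f a 0

lemma pvFold_eq (results : List (List (String × Int))) : ∀ s : Int × Int × Int × Int,
    results.foldl pvStep s
    = (s.1 + pvSumA results 1 1, s.2.1 + pvSumA results 1 0,
       s.2.2.1 + pvSumA results 0 0, s.2.2.2 + pvSumA results 0 1) := by
  induction results with
  | nil => intro s; simp [pvSumA]
  | cons r rs ih =>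
    intro s
    simp only [List.foldl_cons, ih, pvSumA_cons]
    unfold pvStep
    rcases hf : pvKey r "format_reward" with _ | f
    · simp [hf]; try omega
    · rcases ha : pvKey r "answer_reward" with _ | a
      · by_cases h1 : f = 1
        · subst h1; simp [hf, ha]; try omega
        · by_cases h0 : f = 0
          · subst h0; simp [hf, ha]
            try omega
          · simp [hf, ha, h1, h0]; try omega
      · by_cases h1 : f = 1
        · subst h1
          by_cases a1 : a = 1
          · subst a1; simp [hf, ha]; try omega
          · by_cases a0 : a = 0
            · subst a0; simp [hf, ha]; try omega
            · simp [hf, ha, a1, a0]; try omega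
        · by_cases h0 : f = 0
          · subst h0
            by_cases a1 : a = 1
            · subst a1; simp [hf, ha]; try omega
            · by_cases a0 : a = 0
              · subst a0; simp [hf, ha]; try omega
              · simp [hf, ha, a1, a0]; try omega
          · simp [hf, ha, h1, h0]; try omega

-- ===== VERDICT (by name: the statement is the Claim_ definition above) =====
theorem summarize_reward_categories_spec : Claim_equal_summarize_reward_categories := by
  intro results _ _
  unfold Spec_summarize_reward_categories summarize_reward_categories summarize_reward_categories_alt
  simp [pvFold_eq]
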